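-- pv_equiv track=rewrite | github.com/build000r/skillbox | .env-manager/manage.py | expand_graph_ids
-- ===== SOURCE A (Python) =====
-- def expand_graph_ids(graph: dict[str, list[str]], root_ids: list[str]) -> set[str]:
--     expanded = set(root_ids)
--     queue = list(root_ids)
--
--     while queue:
--         item_id = queue.pop()
--         for linked_item_id in graph.get(item_id, []):
--             if linked_item_id in expanded:
--                 continue
--             expanded.add(linked_item_id)
--             queue.append(linked_item_id)
--
--     return expanded
-- ===== SOURCE B (Python) =====
-- def expand_graph_ids(graph: dict[str, list[str]], root_ids: list[str]) -> set[str]: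
--     # Recursive DFS: the call stack replaces A's explicit queue/worklist.
--     # Children are marked before descending; recursion goes last-marked-first,
--     # the same last-in-first-out order a stack pop() yields.
--     expanded = set(root_ids)
--
--     def visit(item_id):
--         fresh = []
--         for child in graph.get(item_id, []):
--             if child not in expanded:
--                 expanded.add(child)
--                 fresh.append(child)
--         for child in reversed(fresh):
--             visit(child)
--
--     for rid in reversed(root_ids):
--         visit(rid)
--     return expanded
-- ===== Notes on version B (the rewrite author's own statement) =====
-- stated objective: alternative
-- what changed: Replaces A's explicit worklist loop (pop from a queue list, push unvisited children) with a recursive DFS helper that marks a node's unvisited children and then recurses into them, using the call stack instead of the queue.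
import Mathlib
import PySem

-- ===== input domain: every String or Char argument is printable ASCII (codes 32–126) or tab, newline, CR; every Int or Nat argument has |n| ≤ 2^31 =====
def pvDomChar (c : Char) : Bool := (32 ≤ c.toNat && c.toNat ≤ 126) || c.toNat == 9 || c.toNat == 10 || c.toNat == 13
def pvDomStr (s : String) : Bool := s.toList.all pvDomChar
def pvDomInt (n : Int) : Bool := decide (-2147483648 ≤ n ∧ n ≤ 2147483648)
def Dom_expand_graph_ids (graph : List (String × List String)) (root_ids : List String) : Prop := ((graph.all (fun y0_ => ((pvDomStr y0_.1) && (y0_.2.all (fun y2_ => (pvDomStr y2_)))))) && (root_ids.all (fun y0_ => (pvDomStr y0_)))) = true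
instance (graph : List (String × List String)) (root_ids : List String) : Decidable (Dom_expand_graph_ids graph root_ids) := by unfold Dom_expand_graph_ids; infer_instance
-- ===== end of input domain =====

-- B replaces A's explicit worklist loop with a recursive DFS helper (mark the unvisited
-- children of a node, then recurse into them); same cost, different decomposition.

-- ===== PORT A =====
-- shared with port B: 'graph.get(x, [])' (both Pythons perform exactly this lookup)
def pvLookup (graph : List (String × List String)) (x : String) : List String :=
  PySem.Dict.getD (PySem.Dict.mk graph) x []

-- shared with port B: the identical inner loop body of both Pythons over one child c:
-- 'if c in expanded: continue; expanded.add(c); <acc>.append(c)' on the state (expanded, acc)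
def pvMark (p : List String × List String) (c : String) : List String × List String :=
  if PySem.Set.contains p.1 c then p else (PySem.Set.add p.1 c, p.2 ++ [c])

-- proof-side only: the finite universe the loop can ever add to 'expanded' beyond its seed,
-- and the count of universe entries not yet expanded (the termination measure)
def pvUniverse (graph : List (String × List String)) : List String :=
  graph.flatMap (fun p => p.2)

def pvCard (graph : List (String × List String)) (e : List String) : Nat :=
  ((pvUniverse graph).filter (fun u => decide (u ∉ e))).length

-- the inner for-loop appends to 'expanded' exactly a nodup block k of fresh children
lemma pvMark_foldl : ∀ (cs e acc : List String), ∃ k : List String,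
    cs.foldl pvMark (e, acc) = (e ++ k, acc ++ k) ∧ (∀ c ∈ k, c ∈ cs) ∧
    (∀ c ∈ k, c ∉ e) ∧ k.Nodup := by
  intro cs
  induction cs with
  | nil => exact fun e acc => ⟨[], by simp, by simp, by simp, List.nodup_nil⟩
  | cons c cs ih =>
    intro e acc
    by_cases hc : c ∈ e
    · obtain ⟨k, h1, h2, h3, h4⟩ := ih e acc
      exact ⟨k, by simpa [pvMark, PySem.Set.contains, hc] using h1,
        fun d hd => List.mem_cons_of_mem _ (h2 d hd), h3, h4⟩
    · obtain ⟨k, h1, h2, h3, h4⟩ := ih (e ++ [c]) (acc ++ [c])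
      refine ⟨c :: k, ?_, ?_, ?_, ?_⟩
      · simpa [pvMark, PySem.Set.contains, PySem.Set.add, hc] using h1
      · intro d hd
        rcases List.mem_cons.1 hd with h | h
        · exact h ▸ List.mem_cons_self ..
        · exact List.mem_cons_of_mem _ (h2 d h)
      · intro d hd
        rcases List.mem_cons.1 hd with h | h
        · exact h ▸ hc
        · exact fun hde => h3 d h (List.mem_append_left _ hde)
      · refine List.nodup_cons.2 ⟨fun hck => ?_, h4⟩
        exact h3 c hck (List.mem_append_right _ (List.mem_singleton_self c))

lemma pvLookup_sub : ∀ (g : List (String × List String)) (x : String),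
    ∀ c ∈ pvLookup g x, c ∈ pvUniverse g := by
  intro g
  induction g with
  | nil => intro x c hc; simp [pvLookup, PySem.Dict.getD, PySem.Dict.get?] at hc
  | cons p g ih =>
    intro x c hc
    obtain ⟨kk, vv⟩ := p
    simp only [pvLookup, PySem.Dict.getD, PySem.Dict.get?_mk_cons] at hc
    simp only [pvUniverse, List.flatMap_cons, List.mem_append]
    by_cases hkx : (kk == x) = true
    · left; simpa [hkx] using hc
    · right
      have : c ∈ pvLookup g x := by
        simpa [hkx, pvLookup, PySem.Dict.getD] using hc
      exact ih x c this

lemma pvCount_split (e k : List String) : ∀ U : List String,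
    (U.filter (fun u => decide (u ∉ e) && decide (u ∈ k))).length +
      (U.filter (fun u => decide (u ∉ e ++ k))).length =
      (U.filter (fun u => decide (u ∉ e))).length := by
  intro U
  induction U with
  | nil => simp
  | cons a t ih =>
    by_cases ha : a ∈ e <;> by_cases hk : a ∈ k <;>
      simp [ha, hk, List.mem_append] at ih ⊢ <;> omega

lemma pvNodup_len (k U : List String) (p : String → Bool) (hnd : k.Nodup)
    (h : ∀ c ∈ k, c ∈ U ∧ p c = true) : k.length ≤ (U.filter p).length := by
  classical
  have hsub : k.toFinset ⊆ (U.filter p).toFinset := by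
    intro c hc
    rw [List.mem_toFinset] at *
    exact List.mem_filter.2 ⟨(h c hc).1, (h c hc).2⟩
  calc k.length = k.toFinset.card := (List.toFinset_card_of_nodup hnd).symm
    _ ≤ (U.filter p).toFinset.card := Finset.card_le_card hsub
    _ ≤ (U.filter p).length := List.toFinset_card_le _

-- expanding by a fresh nodup block k drops the measure by at least k.length
lemma pvCard_step (graph : List (String × List String)) (e k : List String)
    (hU : ∀ c ∈ k, c ∈ pvUniverse graph) (hne : ∀ c ∈ k, c ∉ e) (hnd : k.Nodup) :
    pvCard graph (e ++ k) + k.length ≤ pvCard graph e := by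
  have hsplit := pvCount_split e k (pvUniverse graph)
  have hlen := pvNodup_len k (pvUniverse graph)
    (fun u => decide (u ∉ e) && decide (u ∈ k)) hnd
    (fun c hc => ⟨hU c hc, by simp [hne c hc, hc]⟩)
  unfold pvCard
  omega

-- the while-loop of A: pop the last queue entry, mark its fresh children, push them
def expand_graph_ids_loop (graph : List (String × List String)) (e q : List String) :
    List String :=
  if h : q = [] then e
  else
    let r := (pvLookup graph (q.getLast h)).foldl pvMark (e, q.dropLast)
    expand_graph_ids_loop graph r.1 r.2
termination_by pvCard graph e + q.length
decreasing_by
  obtain ⟨k, hk, hsub, hnot, hnd⟩ := pvMark_foldl (pvLookup graph (q.getLast h)) e q.dropLast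
  have hstep := pvCard_step graph e k
    (fun c hc => pvLookup_sub graph _ c (hsub c hc)) hnot hnd
  have hq1 : q.dropLast.length + 1 = q.length := by
    have h0 : q.length ≠ 0 := fun h0 => h (List.length_eq_zero_iff.1 h0)
    have := List.length_dropLast (xs := q)
    omega
  simp only [hk, List.length_append]
  omega

def expand_graph_ids (graph : List (String × List String)) (root_ids : List String) :
    List String :=
  expand_graph_ids_loop graph (PySem.Set.ofList root_ids) root_ids

-- ===== PORT B =====
-- visit(x) of B: mark the fresh children of x, then recurse into them last-marked-first.
-- The Nat argument is fuel, only a totality guard: expand_graph_ids_alt passes enough of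
-- it that the guard branch is never taken (proved via pvCard below).
def expand_graph_ids_visit (graph : List (String × List String)) :
    Nat → List String → String → List String
  | 0, e, _ => e
  | f + 1, e, x =>
    let r := (pvLookup graph x).foldl pvMark (e, ([] : List String))
    r.2.reverse.foldl (expand_graph_ids_visit graph f) r.1

def expand_graph_ids_alt (graph : List (String × List String)) (root_ids : List String) :
    List String :=
  root_ids.reverse.foldl
    (expand_graph_ids_visit graph ((pvUniverse graph).length + 1))
    (PySem.Set.ofList root_ids)

-- ===== PRECONDITION & SPEC =====
def Spec_expand_graph_ids (graph : List (String × List String)) (root_ids : List String) (out : List String) : Prop := out = expand_graph_ids_alt graph root_ids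
instance (graph : List (String × List String)) (root_ids : List String) (out : List String) : Decidable (Spec_expand_graph_ids graph root_ids out) := by unfold Spec_expand_graph_ids; infer_instance

-- ===== CLAIM (what is proved, stated in full; the proofs are below) =====
def Claim_equal_expand_graph_ids : Prop := ∀ (graph : List (String × List String)) (root_ids : List String), Dom_expand_graph_ids graph root_ids → Spec_expand_graph_ids graph root_ids (expand_graph_ids graph root_ids)

-- ===== LEMMAS AND PROOFS =====

-- the head of the fold's result does not depend on the accumulator of fresh children
lemma pvMark_fst : ∀ (cs e acc acc' : List String),
    (cs.foldl pvMark (e, acc)).1 = (cs.foldl pvMark (e, acc')).1 := by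
  intro cs
  induction cs with
  | nil => intros; rfl
  | cons c cs ih =>
    intro e acc acc'
    by_cases hc : c ∈ e <;>
      simp only [List.foldl_cons, pvMark, PySem.Set.contains, PySem.Set.add] <;>
      simp [hc] <;> apply ih

lemma pvFoldl_prefix {g : List String → String → List String}
    (hg : ∀ a x, a <+: g a x) : ∀ (xs : List String) (a : List String),
    a <+: xs.foldl g a := by
  intro xs
  induction xs with
  | nil => intro a; exact List.prefix_refl a
  | cons x xs ih => intro a; exact (hg a x).trans (ih (g a x))

lemma pvVisit_prefix (graph : List (String × List String)) :
    ∀ (f : Nat) (e : List String) (x : String),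
    e <+: expand_graph_ids_visit graph f e x := by
  intro f
  induction f with
  | zero => intro e x; exact List.prefix_refl e
  | succ f ih =>
    intro e x
    obtain ⟨k, hk, -, -, -⟩ := pvMark_foldl (pvLookup graph x) e []
    simp only [expand_graph_ids_visit, hk]
    exact (List.prefix_append e k).trans (pvFoldl_prefix (fun a y => ih a y) _ _)

lemma pvCard_mono (graph : List (String × List String)) (e e' : List String)
    (h : ∀ u, u ∈ e → u ∈ e') : pvCard graph e' ≤ pvCard graph e := by
  unfold pvCard
  rw [← List.countP_eq_length_filter, ← List.countP_eq_length_filter]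
  refine List.countP_mono_left (fun x _ hx => ?_)
  simp only [decide_eq_true_eq] at *
  exact fun hxe => hx (h x hxe)

-- fuel irrelevance: any fuel above the measure computes the same value
lemma pvVisit_fuel (graph : List (String × List String)) : ∀ (n : Nat),
    ∀ (e : List String) (x : String) (f g : Nat),
    pvCard graph e ≤ n → n + 1 ≤ f → n + 1 ≤ g →
    expand_graph_ids_visit graph f e x = expand_graph_ids_visit graph g e x := by
  intro n
  induction n with
  | zero =>
    intro e x f g hc hf hg
    obtain ⟨f', rfl⟩ : ∃ f', f = f' + 1 := ⟨f - 1, by omega⟩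
    obtain ⟨g', rfl⟩ : ∃ g', g = g' + 1 := ⟨g - 1, by omega⟩
    obtain ⟨k, hk, hsub, hnot, hnd⟩ := pvMark_foldl (pvLookup graph x) e []
    have hkn : k = [] := by
      cases k with
      | nil => rfl
      | cons c k0 =>
        exfalso
        have hcU : c ∈ pvUniverse graph :=
          pvLookup_sub graph x c (hsub c (List.mem_cons_self ..))
        have hcf : c ∈ (pvUniverse graph).filter (fun u => decide (u ∉ e)) :=
          List.mem_filter.2 ⟨hcU, by simp [hnot c (List.mem_cons_self ..)]⟩
        have : 0 < pvCard graph e := by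
          unfold pvCard
          exact List.length_pos_of_mem hcf
        omega
    simp [expand_graph_ids_visit, hk, hkn]
  | succ n ih =>
    intro e x f g hc hf hg
    obtain ⟨f', rfl⟩ : ∃ f', f = f' + 1 := ⟨f - 1, by omega⟩
    obtain ⟨g', rfl⟩ : ∃ g', g = g' + 1 := ⟨g - 1, by omega⟩
    obtain ⟨k, hk, hsub, hnot, hnd⟩ := pvMark_foldl (pvLookup graph x) e []
    simp only [expand_graph_ids_visit, hk]
    cases k with
    | nil => simp
    | cons c k0 =>
      have hstep := pvCard_step graph e (c :: k0)
        (fun d hd => pvLookup_sub graph x d (hsub d hd)) hnot hnd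
      have hc2 : pvCard graph (e ++ c :: k0) ≤ n := by
        simp only [List.length_cons] at hstep
        omega
      have hfold : ∀ (xs a : List String), pvCard graph a ≤ n →
          xs.foldl (expand_graph_ids_visit graph f') a =
          xs.foldl (expand_graph_ids_visit graph g') a := by
        intro xs
        induction xs with
        | nil => intros; rfl
        | cons y ys ihy =>
          intro a ha
          simp only [List.foldl_cons]
          rw [ih a y f' g' ha (by omega) (by omega)]
          refine ihy _ (le_trans (pvCard_mono graph a _ (fun u hu => ?_)) ha)
          exact (pvVisit_prefix graph g' a y).subset hu
      simpa using hfold (c :: k0).reverse (e ++ c :: k0) hc2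

lemma pvVisit_foldl_fuel (graph : List (String × List String))
    (xs : List String) : ∀ (a : List String) (f g : Nat),
    pvCard graph a + 1 ≤ f → pvCard graph a + 1 ≤ g →
    xs.foldl (expand_graph_ids_visit graph f) a =
    xs.foldl (expand_graph_ids_visit graph g) a := by
  induction xs with
  | nil => intros; rfl
  | cons y ys ih =>
    intro a f g hf hg
    simp only [List.foldl_cons]
    rw [pvVisit_fuel graph (pvCard graph a) a y f g (le_refl _) hf hg]
    refine ih _ f g ?_ ?_ <;>
      exact le_trans (Nat.add_le_add_right (pvCard_mono graph a _
        (fun u hu => (pvVisit_prefix graph g a y).subset hu)) 1) (by omega)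

-- the main simulation: A's worklist loop is B's recursive DFS folded over the
-- reversed queue
lemma pvLoop_eq (graph : List (String × List String)) : ∀ (n : Nat),
    ∀ (e q : List String) (f : Nat),
    pvCard graph e + q.length ≤ n → pvCard graph e + 1 ≤ f →
    expand_graph_ids_loop graph e q =
      q.reverse.foldl (expand_graph_ids_visit graph f) e := by
  intro n
  induction n with
  | zero =>
    intro e q f hn hf
    have hq : q = [] := by
      cases q with
      | nil => rfl
      | cons a t => simp at hn
    subst hq
    simp [expand_graph_ids_loop]
  | succ n ih =>
    intro e q f hn hf
    by_cases hq : q = []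
    · subst hq; simp [expand_graph_ids_loop]
    · rw [expand_graph_ids_loop, dif_neg hq]
      obtain ⟨k, hk, hsub, hnot, hnd⟩ :=
        pvMark_foldl (pvLookup graph (q.getLast hq)) e q.dropLast
      have hstep := pvCard_step graph e k
        (fun c hc => pvLookup_sub graph _ c (hsub c hc)) hnot hnd
      have hq1 : q.dropLast.length + 1 = q.length := by
        have h0 : q.length ≠ 0 := fun h0 => hq (List.length_eq_zero_iff.1 h0)
        have := List.length_dropLast (xs := q)
        omega
      simp only [hk]
      rw [ih (e ++ k) (q.dropLast ++ k) f
        (by simp only [List.length_append]; omega)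
        (by have := pvCard_mono graph e (e ++ k) (fun u hu => List.mem_append_left _ hu); omega)]
      conv_rhs => rw [← List.dropLast_append_getLast hq]
      rw [List.reverse_append, List.reverse_append, List.foldl_append]
      simp only [List.reverse_singleton, List.singleton_append, List.foldl_cons]
      congr 1
      -- both sides process exactly the fresh children block k of the popped node
      obtain ⟨f', rfl⟩ : ∃ f', f = f' + 1 := ⟨f - 1, by omega⟩
      obtain ⟨k', hk', hsub', hnot', hnd'⟩ :=
        pvMark_foldl (pvLookup graph (q.getLast hq)) e []
      have hkk : k' = k := by
        have h1 := congrArg Prod.fst hk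
        have h2 := congrArg Prod.fst hk'
        have := pvMark_fst (pvLookup graph (q.getLast hq)) e q.dropLast []
        simp only [this] at h1
        exact List.append_cancel_left (h2.symm.trans h1)
      simp only [expand_graph_ids_visit, hk', hkk, List.nil_append]
      cases k with
      | nil => simp
      | cons c k0 =>
        refine pvVisit_foldl_fuel graph (c :: k0).reverse (e ++ c :: k0) (f' + 1) f' ?_ ?_ <;>
        · have hstep' := hstep
          simp only [List.length_cons] at hstep'
          omega

-- ===== VERDICT (by name: the statement is the Claim_ definition above) =====
theorem expand_graph_ids_spec : Claim_equal_expand_graph_ids := by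
  intro graph root_ids _
  unfold Spec_expand_graph_ids expand_graph_ids expand_graph_ids_alt
  refine pvLoop_eq graph (pvCard graph (PySem.Set.ofList root_ids) + root_ids.length)
    _ _ _ (le_refl _) ?_
  have hle : pvCard graph (PySem.Set.ofList root_ids) ≤ (pvUniverse graph).length := by
    unfold pvCard
    exact List.length_filter_le _ _
  omega
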